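-- pv_equiv track=rewrite | github.com/liziling98/text-compression | huff-decompress.py | bin2str
-- ===== SOURCE A (Python) =====
-- def bin2str(file_data):
--     '''
--     transform the int back to 0/1 string
--     for every int, if the lence of its bits are less than 8, add 0
--     use the add_0_num to remove the supplement 0 when compress
--     code_str: the 0/1 string
--     '''
--     code_str = ''
--     add_0_num = file_data[-1]
--     for i in file_data[:-1]:
--         code_bin = bin(i)[2:] # remove '0b' beforehand
--         if len(code_bin) != 8:
--             code_bin = '0' * (8-len(code_bin)) + code_bin
--         code_str += code_bin
--     return code_str[:-add_0_num] # remove 0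
-- ===== SOURCE B (Python) =====
-- def bin2str(file_data):
--     add_0_num = file_data[-1]
--     data = file_data[:-1]
--     if data:
--         bits = format(int.from_bytes(bytes(data), 'big'), '0{}b'.format(8 * len(data)))
--     else:
--         bits = ''
--     return bits[:-add_0_num]
-- ===== Notes on version B (the rewrite author's own statement) =====
-- stated objective: alternative
-- what changed: Replaces the per-byte bin()/pad/concatenate loop by one big-endian integer conversion (int.from_bytes) of the whole payload followed by a single zero-padded binary format.
-- outside the precondition, e.g. on bin2str([-1, 1]): A returns '000000b', B raises ValueError; on bin2str([256, 1]): A returns '10000000', B raises ValueError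
import Mathlib
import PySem

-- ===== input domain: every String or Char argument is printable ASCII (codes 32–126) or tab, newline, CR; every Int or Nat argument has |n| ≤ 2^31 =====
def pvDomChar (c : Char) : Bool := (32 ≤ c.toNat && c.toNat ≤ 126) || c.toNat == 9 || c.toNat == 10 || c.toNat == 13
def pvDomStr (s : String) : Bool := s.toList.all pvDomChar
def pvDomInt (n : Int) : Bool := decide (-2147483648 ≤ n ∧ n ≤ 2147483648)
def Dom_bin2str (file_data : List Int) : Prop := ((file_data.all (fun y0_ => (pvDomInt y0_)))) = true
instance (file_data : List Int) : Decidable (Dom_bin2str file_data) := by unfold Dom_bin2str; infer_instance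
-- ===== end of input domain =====

-- B replaces A's per-byte bin()/pad/concatenate loop by one big-endian integer
-- conversion of the whole payload followed by a single zero-padded binary format
-- (objective: alternative — a different decomposition of the same O(n) task).

-- ===== PORT A =====

-- loop body of A: code_bin = bin(i)[2:], zero-padded to 8 if its length is not 8
def binChunk (i : Int) : List Char :=
  let codeBin := PySem.List.slice (PySem.Int.toBinChars0b i) (some 2) none
  if codeBin.length ≠ 8 then List.replicate (8 - codeBin.length) '0' ++ codeBin
  else codeBin

def bin2str (file_data : List Int) : String :=
  match PySem.List.pyGet? file_data (-1) with
  | none => ""   -- IndexError on the empty list; excluded by Pre_bin2str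
  | some add0 =>
    let codeStr : List Char :=
      (PySem.List.slice file_data none (some (-1))).foldl
        (fun acc i => acc ++ binChunk i) []
    String.ofList (PySem.List.slice codeStr none (some (-add0)))

-- ===== PORT B =====

def bin2str_alt (file_data : List Int) : String :=
  match PySem.List.pyGet? file_data (-1) with
  | none => ""   -- IndexError on the empty list; excluded by Pre_bin2str
  | some add0 =>
    let data := PySem.List.slice file_data none (some (-1))
    let bits : List Char :=
      if data ≠ [] then
        -- int.from_bytes(bytes(data), 'big'): big-endian accumulation (exact for bytes 0..255)
        let v : Int := data.foldl (fun acc b => acc * 256 + b) 0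
        -- format(v, '0{8*len}b'): binary digits zero-padded on the left (exact for v ≥ 0)
        PySem.Chars.zfill (PySem.Int.toBinChars v) ((8 * data.length : Nat) : Int)
      else []
    String.ofList (PySem.List.slice bits none (some (-add0)))

-- ===== PRECONDITION & SPEC =====
-- Pre_ excludes the empty list (A raises IndexError) and payload entries outside 0..255:
-- there A still returns, but a garbage string (bin(-1)[2:] = 'b1', or >8-bit chunks), while
-- B's bytes(data) raises ValueError — byte values are the function's intended domain.
def Pre_bin2str (file_data : List Int) : Prop :=
  file_data ≠ [] ∧ ∀ x ∈ file_data.dropLast, 0 ≤ x ∧ x < 256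

instance (file_data : List Int) : Decidable (Pre_bin2str file_data) := by
  unfold Pre_bin2str; infer_instance

def pvWitness_bin2str : List Int := [72, 105, 3]

def Spec_bin2str (file_data : List Int) (out : String) : Prop := out = bin2str_alt file_data
instance (file_data : List Int) (out : String) : Decidable (Spec_bin2str file_data out) := by
  unfold Spec_bin2str; infer_instance

-- ===== CLAIM (what is proved, stated in full; the proofs are below) =====
def Claim_equal_bin2str : Prop := ∀ (file_data : List Int), Dom_bin2str file_data → Pre_bin2str file_data → Spec_bin2str file_data (bin2str file_data)

-- ===== LEMMAS AND PROOFS =====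

-- fixed-width big-endian bits of v (MSB first), w bits
def toBits : Nat → Nat → List Char
  | 0, _ => []
  | w + 1, v => toBits w (v / 2) ++ [if v % 2 = 1 then '1' else '0']

-- binary digits of v, MSB first, [] for 0
def binCore : Nat → List Char
  | 0 => []
  | n + 1 => binCore ((n + 1) / 2) ++ [if (n + 1) % 2 = 1 then '1' else '0']
decreasing_by exact Nat.div_lt_self (Nat.succ_pos n) (by omega)

-- what Python's bin(n)[2:] / format(n,'b') produce for n ≥ 0
def pyBinN (n : Nat) : List Char := if n = 0 then ['0'] else binCore n

lemma binCore_pos (n : Nat) (h : 0 < n) :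
    binCore n = binCore (n / 2) ++ [if n % 2 = 1 then '1' else '0'] := by
  cases n with
  | zero => omega
  | succ m => rw [binCore]

lemma toDigitsCore_eq (fuel : Nat) : ∀ n acc, n < fuel →
    Nat.toDigitsCore 2 fuel n acc = pyBinN n ++ acc := by
  induction fuel with
  | zero => intro n acc h; omega
  | succ f ih =>
    intro n acc h
    rw [Nat.toDigitsCore]
    by_cases h2 : n / 2 = 0
    · simp only [h2, if_true]
      have hn1 : n ≤ 1 := by omega
      interval_cases n
      · rfl
      · have h1 : pyBinN 1 = ['1'] := by
          rw [pyBinN, if_neg (by omega), binCore_pos 1 (by omega)]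
          norm_num
          rw [binCore]
        rw [h1]
        rfl
    · rw [if_neg h2, ih (n / 2) _ (by omega)]
      have hn : 0 < n := by omega
      have : pyBinN n = binCore (n / 2) ++ [if n % 2 = 1 then '1' else '0'] := by
        rw [pyBinN, if_neg (by omega), binCore_pos n hn]
      rw [this, pyBinN, if_neg h2]
      have hd : (n % 2).digitChar = if n % 2 = 1 then '1' else '0' := by
        rcases Nat.mod_two_eq_zero_or_one n with h | h <;> rw [h] <;> rfl
      rw [hd, List.append_assoc]
      rfl

lemma toDigits_two (n : Nat) : Nat.toDigits 2 n = pyBinN n := by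
  rw [Nat.toDigits, toDigitsCore_eq (n + 1) n [] (by omega), List.append_nil]

lemma toBits_zero (w : Nat) : toBits w 0 = List.replicate w '0' := by
  induction w with
  | zero => rfl
  | succ w ih =>
    rw [toBits, Nat.zero_div, ih, List.replicate_succ']
    norm_num

lemma mem_binCore (v : Nat) : ∀ c ∈ binCore v, c = '0' ∨ c = '1' := by
  induction v using Nat.strong_induction_on with
  | _ v ih =>
    intro c hc
    cases v with
    | zero => simp [binCore] at hc
    | succ m =>
      rw [binCore] at hc
      rcases List.mem_append.mp hc with h | h
      · exact ih _ (Nat.div_lt_self (Nat.succ_pos m) (by omega)) c h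
      · rcases List.mem_singleton.mp h with rfl
        split <;> simp

lemma pad_binCore (v : Nat) : ∀ w, 0 < v → v < 2 ^ w →
    List.replicate (w - (binCore v).length) '0' ++ binCore v = toBits w v := by
  induction v using Nat.strong_induction_on with
  | _ v ih =>
    intro w hv hw
    have hw1 : 0 < w := by
      by_contra h
      have : w = 0 := by omega
      subst this; simp at hw; omega
    obtain ⟨w', rfl⟩ : ∃ w', w = w' + 1 := ⟨w - 1, by omega⟩
    rw [binCore_pos v hv, toBits]
    by_cases h2 : v / 2 = 0
    · have hv1 : v = 1 := by omega
      subst hv1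
      simp [binCore, toBits_zero]
    · have hlt : v / 2 < v := Nat.div_lt_self hv (by omega)
      have hb : v / 2 < 2 ^ w' := by
        have : 2 ^ (w' + 1) = 2 * 2 ^ w' := by ring
        omega
      rw [← ih (v / 2) hlt w' (by omega) hb]
      rw [List.length_append, List.length_singleton]
      have : w' + 1 - ((binCore (v / 2)).length + 1) = w' - (binCore (v / 2)).length := by omega
      rw [this, ← List.append_assoc]

lemma pad_pyBinN (v w : Nat) (hw : 0 < w) (h : v < 2 ^ w) :
    List.replicate (w - (pyBinN v).length) '0' ++ pyBinN v = toBits w v := by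
  by_cases hv : v = 0
  · subst hv
    rw [toBits_zero, pyBinN, if_pos rfl]
    rw [show List.replicate w '0' = List.replicate (w - 1) '0' ++ List.replicate 1 '0' by
      rw [← List.replicate_add]; congr 1; omega]
    rfl
  · rw [pyBinN, if_neg hv]
    exact pad_binCore v w (by omega) h

lemma pyBinN_length_le (v w : Nat) (hw : 0 < w) (h : v < 2 ^ w) : (pyBinN v).length ≤ w := by
  rw [← toDigits_two]
  exact Nat.toDigits_length 2 v w hw h

-- A's loop body on a byte value
lemma binChunk_eq (i : Int) (h0 : 0 ≤ i) (h1 : i < 256) : binChunk i = toBits 8 i.toNat := by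
  have hlt : i.toNat < 2 ^ 8 := by omega
  have hcb : PySem.List.slice (PySem.Int.toBinChars0b i) (some 2) none = pyBinN i.toNat := by
    rw [PySem.Int.toBinChars0b, if_neg (by omega)]
    rw [PySem.List.slice_from _ (by norm_num : (0:Int) ≤ 2)]
    rw [toDigits_two]
    rfl
  rw [binChunk, hcb]
  have hle := pyBinN_length_le i.toNat 8 (by omega) hlt
  by_cases h8 : (pyBinN i.toNat).length = 8
  · rw [if_neg (by simp [h8])]
    have := pad_pyBinN i.toNat 8 (by omega) hlt
    rwa [h8, Nat.sub_self, List.replicate_zero, List.nil_append] at this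
  · rw [if_pos (by simp [h8])]
    exact pad_pyBinN i.toNat 8 (by omega) hlt

-- zfill of format(v,'b') with width w is exactly the fixed-width bits, for v < 2^w
lemma zfill_pyBinN (v w : Nat) (hw : 0 < w) (h : v < 2 ^ w) :
    PySem.Chars.zfill (pyBinN v) ((w : Nat) : Int) = toBits w v := by
  have hle := pyBinN_length_le v w hw h
  have hpad := pad_pyBinN v w hw h
  rw [PySem.Chars.zfill.eq_def]
  by_cases hcase : ((w : Nat) : Int) ≤ ((pyBinN v).length : Int)
  · rw [if_pos hcase]
    have hcase' : w ≤ (pyBinN v).length := by exact_mod_cast hcase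
    have hlw : (pyBinN v).length = w := by omega
    rw [← hpad, hlw, Nat.sub_self, List.replicate_zero, List.nil_append]
  · rw [if_neg hcase]
    have hne : pyBinN v ≠ [] := by
      rw [pyBinN]; split
      · simp
      · rename_i hv
        rw [binCore_pos v (by omega)]
        simp
    obtain ⟨c, rest, hcr⟩ := List.exists_cons_of_ne_nil hne
    rw [hcr]
    have hc : c = '0' ∨ c = '1' := by
      have hmem : c ∈ pyBinN v := by rw [hcr]; exact List.mem_cons_self
      rw [pyBinN] at hmem
      by_cases hv : v = 0
      · rw [if_pos hv] at hmem; left; simpa using hmem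
      · rw [if_neg hv] at hmem; exact mem_binCore v c hmem
    have hnotpm : ¬(c = '+' ∨ c = '-') := by
      rcases hc with rfl | rfl <;> simp
    dsimp only
    rw [if_neg hnotpm, ← hcr, ← hpad, Int.toNat_natCast]

-- big-endian Nat fold: shift and bound
lemma natFold_shift (ds : List Nat) : ∀ a : Nat,
    ds.foldl (fun acc d => acc * 256 + d) a
      = a * 256 ^ ds.length + ds.foldl (fun acc d => acc * 256 + d) 0 := by
  induction ds with
  | nil => intro a; simp
  | cons d ds ih =>
    intro a
    simp only [List.foldl_cons, List.length_cons, Nat.zero_mul, Nat.zero_add]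
    rw [ih (a * 256 + d), ih d]
    ring

lemma natFold_lt (ds : List Nat) (h : ∀ d ∈ ds, d < 256) :
    ds.foldl (fun acc d => acc * 256 + d) 0 < 256 ^ ds.length := by
  induction ds with
  | nil => simp
  | cons d ds ih =>
    simp only [List.foldl_cons, List.length_cons, Nat.zero_mul, Nat.zero_add]
    rw [natFold_shift ds d]
    have hd : d < 256 := h d List.mem_cons_self
    have hr : ds.foldl (fun acc d => acc * 256 + d) 0 < 256 ^ ds.length :=
      ih (fun x hx => h x (List.mem_cons_of_mem d hx))
    have h2 : (d + 1) * 256 ^ ds.length ≤ 256 ^ (ds.length + 1) := by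
      rw [pow_succ, Nat.mul_comm (256 ^ ds.length) 256]
      exact Nat.mul_le_mul_right _ (by omega)
    nlinarith

-- Int fold equals the Nat fold, for nonnegative entries
lemma intFold_eq (ds : List Int) (h : ∀ d ∈ ds, 0 ≤ d) : ∀ a : Nat,
    ds.foldl (fun acc b => acc * 256 + b) ((a : Nat) : Int)
      = (((ds.map Int.toNat).foldl (fun acc d => acc * 256 + d) a : Nat) : Int) := by
  induction ds with
  | nil => intro a; simp
  | cons d ds ih =>
    intro a
    simp only [List.foldl_cons, List.map_cons]
    have hd : 0 ≤ d := h d List.mem_cons_self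
    have : ((a : Nat) : Int) * 256 + d = (((a * 256 + d.toNat : Nat)) : Int) := by
      push_cast [Int.toNat_of_nonneg hd]; ring
    rw [this, ih (fun x hx => h x (List.mem_cons_of_mem d hx))]

-- splitting fixed-width bits at a byte boundary
lemma toBits_split (b : Nat) : ∀ (y a x : Nat), y < 2 ^ b →
    toBits (a + b) (x * 2 ^ b + y) = toBits a x ++ toBits b y := by
  induction b with
  | zero =>
    intro y a x hy
    have : y = 0 := by omega
    subst this
    simp [toBits]
  | succ b ih =>
    intro y a x hy
    have h2 : 2 ^ (b + 1) = 2 * 2 ^ b := by ring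
    have hstep : (a + (b + 1)) = (a + b) + 1 := by omega
    rw [hstep, toBits]
    have hx : x * 2 ^ (b + 1) = 2 * (x * 2 ^ b) := by ring
    have hdiv : (x * 2 ^ (b + 1) + y) / 2 = x * 2 ^ b + y / 2 := by
      rw [hx]; omega
    have hmod : (x * 2 ^ (b + 1) + y) % 2 = y % 2 := by
      rw [hx]; omega
    rw [hdiv, hmod, ih (y / 2) a x (by rw [h2] at hy; omega)]
    rw [List.append_assoc]
    congr 1


-- the key identity: concatenated 8-bit chunks = fixed-width bits of the big-endian value
lemma flatMap_toBits (ds : List Nat) (h : ∀ d ∈ ds, d < 256) :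
    ds.flatMap (fun d => toBits 8 d)
      = toBits (8 * ds.length) (ds.foldl (fun acc d => acc * 256 + d) 0) := by
  induction ds with
  | nil => rfl
  | cons d ds ih =>
    simp only [List.flatMap_cons, List.foldl_cons, List.length_cons, Nat.zero_mul, Nat.zero_add]
    rw [ih (fun x hx => h x (List.mem_cons_of_mem d hx))]
    rw [natFold_shift ds d]
    have hr : ds.foldl (fun acc d => acc * 256 + d) 0 < 2 ^ (8 * ds.length) := by
      have := natFold_lt ds (fun x hx => h x (List.mem_cons_of_mem d hx))
      rwa [show (256 : Nat) ^ ds.length = 2 ^ (8 * ds.length) by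
        rw [show (256 : Nat) = 2 ^ 8 from rfl, ← pow_mul]] at this
    have h256 : (256 : Nat) ^ ds.length = 2 ^ (8 * ds.length) := by
      rw [show (256 : Nat) = 2 ^ 8 from rfl, ← pow_mul]
    rw [show 8 * (ds.length + 1) = 8 + 8 * ds.length by ring, h256]
    rw [toBits_split (8 * ds.length) _ 8 d hr]

-- A's concatenation equals B's formatted big integer, on byte payloads
lemma codeStr_eq_bits (data : List Int) (h : ∀ x ∈ data, 0 ≤ x ∧ x < 256) :
    data.foldl (fun acc i => acc ++ binChunk i) []
      = (if data ≠ [] then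
          PySem.Chars.zfill
            (PySem.Int.toBinChars (data.foldl (fun acc b => acc * 256 + b) 0))
            ((8 * data.length : Nat) : Int)
        else []) := by
  rw [PySem.List.foldl_append_eq_flatMap binChunk data [], List.nil_append]
  by_cases hnil : data = []
  · subst hnil; simp
  · rw [if_pos (by simpa using hnil)]
    have hmap : data.flatMap binChunk
        = (data.map Int.toNat).flatMap (fun d => toBits 8 d) := by
      rw [List.flatMap_map]
      apply List.flatMap_congr
      intro x hx
      exact binChunk_eq x (h x hx).1 (h x hx).2
    have hbytes : ∀ d ∈ data.map Int.toNat, d < 256 := by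
      intro d hd
      obtain ⟨x, hx, rfl⟩ := List.mem_map.mp hd
      have := h x hx; omega
    rw [hmap, flatMap_toBits _ hbytes]
    have hfold := intFold_eq data (fun x hx => (h x hx).1) 0
    simp only [Nat.cast_zero] at hfold
    set N : Nat := (data.map Int.toNat).foldl (fun acc d => acc * 256 + d) 0 with hN
    rw [hfold, PySem.Int.toBinChars, if_neg (by omega), Int.toNat_natCast, toDigits_two]
    have hlen : (data.map Int.toNat).length = data.length := by simp
    have hNlt : N < 2 ^ (8 * data.length) := by
      have := natFold_lt (data.map Int.toNat) hbytes
      rwa [show (256 : Nat) ^ (data.map Int.toNat).length = 2 ^ (8 * data.length) by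
        rw [hlen, show (256 : Nat) = 2 ^ 8 from rfl, ← pow_mul]] at this
    rw [zfill_pyBinN N (8 * data.length)
      (by have : data.length ≠ 0 := fun h0 => hnil (List.eq_nil_of_length_eq_zero h0); omega)
      hNlt, hlen]

-- ===== VERDICT (by name: the statement is the Claim_ definition above) =====
theorem bin2str_spec : Claim_equal_bin2str := by
  intro file_data _hdom hpre
  obtain ⟨hne, hbytes⟩ := hpre
  unfold Spec_bin2str bin2str bin2str_alt
  cases hget : PySem.List.pyGet? file_data (-1) with
  | none => rfl
  | some add0 =>
    simp only
    congr 1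
    rw [PySem.List.slice_to_neg_one]
    exact congrArg (fun l => PySem.List.slice l none (some (-add0)))
      (codeStr_eq_bits file_data.dropLast hbytes)
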